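-- pv_equiv track=rewrite | github.com/hgl71964/minitorch | minitorch/tensor_ops.py | _check_shape_larger
-- ===== SOURCE A (Python) =====
-- def _check_shape_larger(out_shape, in_shape) -> bool:
--     n1 = len(out_shape)
--     n2 = len(in_shape)
--
--     if n1 == n2:
--         for k in range(n1):
--             i = out_shape[k]
--             j = in_shape[k]
--             if i < j:
--                 return False
--     elif n1 > n2:
--         diff = n1 - n2
--         new_in_shape = tuple([1 for i in range(diff)]) + tuple(in_shape)
--         for k in range(n1):
--             i = out_shape[k]
--             j = new_in_shape[k]
--             if i < j:
--                 return False
--     else: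
--         return False
--
--     return True
-- ===== SOURCE B (Python) =====
-- def _check_shape_larger(out_shape, in_shape) -> bool:
--     # Consume both shapes right-to-left through iterators: no lengths, no padding.
--     oit = iter(reversed(list(out_shape)))
--     for i in reversed(list(in_shape)):
--         o = next(oit, None)
--         if o is None or o < i:
--             return False
--     # dimensions of out_shape left over are broadcast against an implicit 1
--     return all(o >= 1 for o in oit)
-- ===== Notes on version B (the rewrite author's own statement) =====
-- stated objective: simpler
-- what changed: Replaces A's three-way length casing and padded-tuple index loop by a single right-to-left iterator sweep: in_shape's reversed dims are matched against a reversed out_shape iterator (exhaustion = reject), and the leftover leading out dims are checked >= 1; no lengths, padding or indices are computed.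
import Mathlib
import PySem

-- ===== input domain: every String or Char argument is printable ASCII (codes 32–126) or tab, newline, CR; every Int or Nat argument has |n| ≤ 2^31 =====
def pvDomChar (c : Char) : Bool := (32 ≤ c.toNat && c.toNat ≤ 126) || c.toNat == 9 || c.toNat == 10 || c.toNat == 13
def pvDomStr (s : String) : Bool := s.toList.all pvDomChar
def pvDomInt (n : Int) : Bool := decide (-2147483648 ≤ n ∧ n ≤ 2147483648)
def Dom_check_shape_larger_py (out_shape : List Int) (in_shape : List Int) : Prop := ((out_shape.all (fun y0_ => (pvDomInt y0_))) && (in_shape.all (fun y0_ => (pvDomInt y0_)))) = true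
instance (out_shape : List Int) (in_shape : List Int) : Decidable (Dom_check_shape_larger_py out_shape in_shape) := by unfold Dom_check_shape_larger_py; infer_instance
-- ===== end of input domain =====

-- B replaces A's three-way length casing and padded-tuple index loop by a single
-- right-to-left sweep consuming both reversed shapes (no lengths, no padding); objective: simpler.

-- ===== PORT A =====
-- A's 'for k in range(n): if out[k] < in[k]: return False' loop (indices always in range)
def pvScanA (a b : List Int) : List Nat → Bool
  | [] => true
  | k :: ks => if a.getD k 0 < b.getD k 0 then false else pvScanA a b ks

def check_shape_larger_py (out_shape : List Int) (in_shape : List Int) : Bool :=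
  let n1 := out_shape.length
  let n2 := in_shape.length
  if n1 = n2 then
    pvScanA out_shape in_shape (List.range n1)
  else if n1 > n2 then
    let new_in_shape := List.replicate (n1 - n2) (1 : Int) ++ in_shape
    pvScanA out_shape new_in_shape (List.range n1)
  else
    false

-- ===== PORT B =====
-- B's loop 'for i in reversed(in_shape): o = next(oit, None); …' followed by
-- 'all(o >= 1 for o in oit)', as structural recursion on the two reversed lists.
def pvGo : List Int → List Int → Bool
  | o, [] => o.all (fun x => 1 ≤ x)
  | [], _ :: _ => false
  | a :: o, b :: i => if a < b then false else pvGo o i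

def check_shape_larger_py_alt (out_shape : List Int) (in_shape : List Int) : Bool :=
  pvGo out_shape.reverse in_shape.reverse

-- ===== PRECONDITION & SPEC =====
def Spec_check_shape_larger_py (out_shape : List Int) (in_shape : List Int) (out : Bool) : Prop := out = check_shape_larger_py_alt out_shape in_shape
instance (out_shape : List Int) (in_shape : List Int) (out : Bool) : Decidable (Spec_check_shape_larger_py out_shape in_shape out) := by unfold Spec_check_shape_larger_py; infer_instance

-- ===== CLAIM (what is proved, stated in full; the proofs are below) =====
def Claim_equal_check_shape_larger_py : Prop := ∀ (out_shape : List Int) (in_shape : List Int), Dom_check_shape_larger_py out_shape in_shape → Spec_check_shape_larger_py out_shape in_shape (check_shape_larger_py out_shape in_shape)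

-- ===== LEMMAS AND PROOFS =====
theorem pvScanA_eq_all (a b : List Int) (ks : List Nat) :
    pvScanA a b ks = ks.all (fun k => !(decide (a.getD k 0 < b.getD k 0))) := by
  induction ks with
  | nil => rfl
  | cons k ks ih =>
    simp only [pvScanA, List.all_cons, ih]
    split_ifs with h
    · simp only [decide_eq_true h, Bool.not_true, Bool.false_and]
    · simp only [decide_eq_false h, Bool.not_false, Bool.true_and]

theorem pvScan_char (a b : List Int) (n : Nat) :
    pvScanA a b (List.range n) = true ↔ ∀ k < n, ¬ a.getD k 0 < b.getD k 0 := by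
  rw [pvScanA_eq_all]
  simp [List.all_eq_true, List.mem_range]

-- characterisation of B's recursion on arbitrary (already reversed) lists
theorem pvGo_char (i : List Int) : ∀ o : List Int,
    (pvGo o i = true ↔
      i.length ≤ o.length ∧
      (∀ k < i.length, i.getD k 0 ≤ o.getD k 0) ∧
      (∀ k, i.length ≤ k → k < o.length → 1 ≤ o.getD k 0)) := by
  induction i with
  | nil =>
    intro o
    simp only [pvGo, List.all_eq_true, List.length_nil]
    constructor
    · intro H
      refine ⟨Nat.zero_le _, fun k hk => absurd hk (Nat.not_lt_zero k), fun k _ hk => ?_⟩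
      have := H _ (List.getElem_mem hk)
      rw [List.getD_eq_getElem _ _ hk]
      simpa using this
    · rintro ⟨-, -, H3⟩ x hx
      rw [List.mem_iff_getElem] at hx
      obtain ⟨j, hj, rfl⟩ := hx
      have := H3 j (Nat.zero_le _) hj
      rw [List.getD_eq_getElem _ _ hj] at this
      simpa using this
  | cons b i ih =>
    intro o
    cases o with
    | nil =>
      simp only [pvGo, List.length_cons, List.length_nil]
      constructor
      · intro h; exact absurd h (by simp)
      · rintro ⟨h, -, -⟩; omega
    | cons a o =>
      simp only [pvGo, List.length_cons]
      split_ifs with hab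
      · constructor
        · intro h; exact absurd h (by simp)
        · rintro ⟨-, H2, -⟩
          have := H2 0 (Nat.succ_pos _)
          simp only [List.getD_cons_zero] at this
          omega
      · rw [ih o]
        constructor
        · rintro ⟨H1, H2, H3⟩
          refine ⟨by omega, ?_, ?_⟩
          · intro k hk
            cases k with
            | zero => simp only [List.getD_cons_zero]; omega
            | succ k =>
              simp only [List.getD_cons_succ]
              exact H2 k (by omega)
          · intro k hk1 hk2
            cases k with
            | zero => omega
            | succ k =>
              simp only [List.getD_cons_succ]
              exact H3 k (by omega) (by omega)
        · rintro ⟨H1, H2, H3⟩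
          refine ⟨by omega, ?_, ?_⟩
          · intro k hk
            have := H2 (k + 1) (by omega)
            simpa only [List.getD_cons_succ] using this
          · intro k hk1 hk2
            have := H3 (k + 1) (by omega) (by omega)
            simpa only [List.getD_cons_succ] using this

theorem getD_reverse (l : List Int) (k : Nat) (hk : k < l.length) :
    l.reverse.getD k 0 = l.getD (l.length - 1 - k) 0 := by
  rw [List.getD_eq_getElem _ _ (by simpa using hk),
    List.getD_eq_getElem _ _ (by omega : l.length - 1 - k < l.length),
    List.getElem_reverse]

theorem check_shape_larger_py_spec_aux (out_shape in_shape : List Int) :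
    check_shape_larger_py out_shape in_shape = check_shape_larger_py_alt out_shape in_shape := by
  set n1 := out_shape.length with hn1
  set n2 := in_shape.length with hn2
  have hBchar := pvGo_char in_shape.reverse out_shape.reverse
  by_cases h : n1 < n2
  · -- both reject when out_shape is shorter
    unfold check_shape_larger_py
    rw [if_neg (by omega), if_neg (by omega)]
    unfold check_shape_larger_py_alt
    rw [Bool.eq_iff_iff, hBchar]
    simp only [List.length_reverse, ← hn1, ← hn2]
    constructor
    · intro hf; exact absurd hf (by simp)
    · rintro ⟨hlen, -, -⟩; omega
  · have h' : n2 ≤ n1 := by omega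
    set d := n1 - n2 with hd
    have hA : check_shape_larger_py out_shape in_shape
        = pvScanA out_shape (List.replicate d (1 : Int) ++ in_shape) (List.range n1) := by
      unfold check_shape_larger_py
      by_cases he : out_shape.length = in_shape.length
      · rw [if_pos he]
        have hd0 : d = 0 := by omega
        rw [hd0, List.replicate_zero, List.nil_append]
      · rw [if_neg he, if_pos (by omega)]
    have hpad1 : ∀ k, k < d → (List.replicate d (1 : Int) ++ in_shape).getD k 0 = 1 := by
      intro k hk
      rw [List.getD_append _ _ _ _ (by simpa using hk),
        List.getD_eq_getElem _ _ (by simpa using hk), List.getElem_replicate]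
    have hpad2 : ∀ j, (List.replicate d (1 : Int) ++ in_shape).getD (d + j) 0
        = in_shape.getD j 0 := by
      intro j
      rw [List.getD_append_right _ _ _ _ (by simp)]
      simp
    rw [hA, Bool.eq_iff_iff, pvScan_char]
    unfold check_shape_larger_py_alt
    rw [hBchar]
    simp only [List.length_reverse, ← hn1, ← hn2]
    constructor
    · intro H
      refine ⟨h', ?_, ?_⟩
      · intro k hk
        rw [getD_reverse in_shape k (by omega), getD_reverse out_shape k (by omega)]
        simp only [← hn1, ← hn2]
        have := H (d + (n2 - 1 - k)) (by omega)
        rw [hpad2] at this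
        have he1 : n1 - 1 - k = d + (n2 - 1 - k) := by omega
        rw [he1]
        omega
      · intro k hk1 hk2
        rw [getD_reverse out_shape k (by omega)]
        simp only [← hn1]
        have hlt : n1 - 1 - k < d := by omega
        have := H (n1 - 1 - k) (by omega)
        rw [hpad1 _ hlt] at this
        omega
    · rintro ⟨-, H2, H3⟩ k hk
      by_cases hkd : k < d
      · rw [hpad1 k hkd]
        have := H3 (n1 - 1 - k) (by omega) (by omega)
        rw [getD_reverse out_shape _ (by omega)] at this
        simp only [← hn1] at this
        have he : n1 - 1 - (n1 - 1 - k) = k := by omega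
        rw [he] at this
        omega
      · have hk2 : k = d + (k - d) := by omega
        rw [hk2, hpad2]
        have hj : k - d < n2 := by omega
        have := H2 (n2 - 1 - (k - d)) (by omega)
        rw [getD_reverse in_shape _ (by omega), getD_reverse out_shape _ (by omega)] at this
        simp only [← hn1, ← hn2] at this
        have he1 : n2 - 1 - (n2 - 1 - (k - d)) = k - d := by omega
        have he2 : n1 - 1 - (n2 - 1 - (k - d)) = d + (k - d) := by omega
        rw [he1, he2] at this
        omega

-- ===== VERDICT (by name: the statement is the Claim_ definition above) =====
theorem check_shape_larger_py_spec : Claim_equal_check_shape_larger_py := by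
  intro out_shape in_shape _
  unfold Spec_check_shape_larger_py
  exact check_shape_larger_py_spec_aux out_shape in_shape
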